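-- pv_equiv track=rewrite | github.com/uemoto1/mu_exampler | kwsearch.py | search
-- ===== SOURCE A (Python) =====
-- def _trim_ast(kw):
--     nkw = len(kw)
--     for i in range(nkw):
--         if kw[i] != '*':
--             nast_l = i
--             break
--     for i in range(nkw):
--         if kw[nkw - i - 1] != '*':
--             nast_r = i
--             break
--     kw_t = kw[nast_l:nkw - nast_r]
--     return nast_l, nast_r, kw_t
--
-- def _match_rec(kw, data, pos):
--     if len(kw) == 0:
--         flag, endpos = True, pos
--     elif kw[0] == '*':
--         flag, endpos = _match_rec(kw[1:], data, pos + 1)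
--         if not flag:  # Retry matching with skipping current word.
--             flag, endpos = _match_rec(kw[1:], data, pos)
--     elif pos < len(data) and kw[0] == data[pos]:
--         flag, endpos = _match_rec(kw[1:], data, pos + 1)
--     else:
--         flag, endpos = False, None
--     return flag, endpos
--
-- def search(kw, data, pos=0):
--     nast_l, nast_r, kw_t = _trim_ast(kw)
--     # Main loop
--     flag, pos_m, endpos_m = False, None, None
--     for pos_t in range(pos, len(data)):
--         flag, endpos_t = _match_rec(kw_t, data, pos_t)
--         if flag:
--             pos_m = max(0, pos_t - nast_l)
--             endpos_m = min(len(data), endpos_t + nast_r)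
--             break
--     return flag, pos_m, endpos_m
-- ===== SOURCE B (Python) =====
-- def search(kw, data, pos=0):
--     nkw = len(kw)
--     j = 0
--     while j < nkw and kw[j] == '*':
--         j += 1
--     k = nkw
--     while k > j and kw[k - 1] == '*':
--         k -= 1
--     kw_t = kw[j:k]
--     n = len(data)
--     m = k - j
--     # end[c]: where a match of the current pattern suffix starting at word pos + c
--     # ends (None if it cannot match).  The empty suffix matches everywhere,
--     # ending right where it starts.
--     end = [pos + c for c in range(n + m - pos + 1)]
--     for i in range(m - 1, -1, -1):
--         w = kw_t[i]
--         if w == '*':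
--             end = [end[c + 1] if end[c + 1] is not None else end[c]
--                    for c in range(n + i - pos + 1)]
--         else:
--             end = [end[c + 1] if pos + c < n and data[pos + c] == w else None
--                    for c in range(n + i - pos + 1)]
--     for c in range(n - pos):
--         if end[c] is not None:
--             return True, max(0, pos + c - j), min(n, end[c] + (nkw - k))
--     return False, None, None
-- ===== Notes on version B (the rewrite author's own statement) =====
-- stated objective: faster
-- what changed: A's exponential DFS over per-wildcard skip/consume choices is replaced by a bottom-up DP table end[c] over (pattern-suffix, start offset) that preserves A's preference order ('*' consumes one word before trying zero); Pre_ excludes only inputs where A raises (keyword lists with no word other than '*', UnboundLocalError in _trim_ast, and pos < -len(data), IndexError).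
import Mathlib
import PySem

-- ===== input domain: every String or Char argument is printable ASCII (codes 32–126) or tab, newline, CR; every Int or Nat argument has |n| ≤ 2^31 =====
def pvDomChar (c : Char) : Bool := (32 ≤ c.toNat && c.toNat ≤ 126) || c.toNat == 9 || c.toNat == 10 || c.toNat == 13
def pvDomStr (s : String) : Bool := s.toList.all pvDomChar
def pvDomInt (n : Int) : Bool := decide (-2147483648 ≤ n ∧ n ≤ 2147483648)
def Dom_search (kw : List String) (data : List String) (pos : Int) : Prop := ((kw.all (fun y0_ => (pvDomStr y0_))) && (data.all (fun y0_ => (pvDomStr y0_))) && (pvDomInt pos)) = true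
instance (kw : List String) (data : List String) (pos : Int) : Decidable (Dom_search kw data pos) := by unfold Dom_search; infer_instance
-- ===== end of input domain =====

-- B replaces A's exponential DFS over wildcard choices by a bottom-up DP table over
-- (pattern-suffix, start offset), preserving A's preference ('*' consumes one word first).

-- ===== PORT A =====
-- _match_rec: '*' tries consuming one word first, then zero; a literal word must equal data[pos].
-- (Where Python would raise IndexError — data[p] with p < -len(data), excluded by Pre_search —
-- the pyGet? none case is folded into the failing branch.)
def matchRec : List String → List String → Int → Bool × Option Int
  | [], _, p => (true, some p)
  | k0 :: ks, data, p =>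
    if k0 = "*" then
      let r := matchRec ks data (p + 1)
      if r.1 then r else matchRec ks data p
    else if p < (data.length : Int) ∧ PySem.List.pyGet? data p = some k0 then
      matchRec ks data (p + 1)
    else (false, none)

-- the main 'for pos_t in range(pos, len(data))' loop with its break
def searchLoop (kwt data : List String) (nl nr : Int) : List Int → Bool × Option Int × Option Int
  | [] => (false, none, none)
  | p :: ps =>
    let r := matchRec kwt data p
    if r.1 then
      (true, some (max 0 (p - nl)), r.2.map (fun e => min (data.length : Int) (e + nr)))
    else searchLoop kwt data nl nr ps

-- _trim_ast's two 'for i in range(nkw): … break' scans, as find? over the same range;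
-- none = Python's UnboundLocalError (all-'*' keyword list, excluded by Pre_search).
def search (kw : List String) (data : List String) (pos : Int) : Bool × Option Int × Option Int :=
  match (List.range kw.length).find? (fun i => kw.getD i "" != "*") with
  | none => (false, none, none)
  | some nl =>
    match (List.range kw.length).find? (fun i => kw.getD (kw.length - i - 1) "" != "*") with
    | none => (false, none, none)
    | some nr =>
      let kwt := PySem.List.slice kw (some (nl : Int)) (some ((kw.length : Int) - (nr : Int)))
      searchLoop kwt data (nl : Int) (nr : Int) (PySem.List.pyRange pos data.length 1)

-- ===== PORT B =====
-- Source B's leading-star while loop (and, on the reversed rest, the trailing-star one)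
def countLead : List String → Nat
  | [] => 0
  | x :: xs => if x = "*" then countLead xs + 1 else 0

-- the seed row: [pos + c for c in range(n + m - pos + 1)] — the empty suffix matches everywhere
def rowInit (pos : Int) (width : Nat) : List (Option Int) :=
  (List.range width).map (fun (c : Nat) => some (pos + (c : Int)))

-- one step of Source B's 'for i in range(m - 1, -1, -1)' loop (the two comprehensions)
def rowStep (w : String) (data : List String) (pos : Int) (width : Nat)
    (row : List (Option Int)) : List (Option Int) :=
  if w = "*" then
    (List.range width).map (fun (c : Nat) =>
      if (row.getD (c + 1) none).isSome then row.getD (c + 1) none else row.getD c none)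
  else
    (List.range width).map (fun (c : Nat) =>
      if pos + (c : Int) < (data.length : Int) ∧
          PySem.List.pyGet? data (pos + (c : Int)) = some w
      then row.getD (c + 1) none else none)

-- rows built from the last pattern word backwards; row for suffix s has width w0 - s.length
def buildRows (data : List String) (pos : Int) (w0 : Nat) : List String → List (Option Int)
  | [] => rowInit pos w0
  | w :: s => rowStep w data pos (w0 - (s.length + 1)) (buildRows data pos w0 s)

-- Source B's final 'for c in range(n - pos)' scan with its early return
def finalScan (row : List (Option Int)) (pos nl nr n : Int) :
    Nat → Nat → Bool × Option Int × Option Int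
  | _, 0 => (false, none, none)
  | c, fuel + 1 =>
    let e := row.getD c none
    if e.isSome then
      (true, some (max 0 (pos + (c : Int) - nl)), some (min n (e.getD 0 + nr)))
    else finalScan row pos nl nr n (c + 1) fuel

def search_alt (kw : List String) (data : List String) (pos : Int) : Bool × Option Int × Option Int :=
  let n : Int := data.length
  let nkw := kw.length
  let j := countLead kw
  let k := nkw - countLead ((kw.drop j).reverse)
  let kwt := (kw.drop j).take (k - j)
  let row := buildRows data pos ((n + ((k - j : Nat) : Int) - pos + 1).toNat) kwt
  finalScan row pos (j : Int) ((nkw - k : Nat) : Int) n 0 ((n - pos).toNat)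

-- ===== PRECONDITION & SPEC =====
-- Pre_ excludes exactly the inputs on which A raises: kw with no word other than '*'
-- (UnboundLocalError in _trim_ast, also for empty kw) and pos < -len(data) (IndexError).
def Pre_search (kw : List String) (data : List String) (pos : Int) : Prop :=
  (∃ s ∈ kw, s ≠ "*") ∧ -(data.length : Int) ≤ pos
instance (kw : List String) (data : List String) (pos : Int) : Decidable (Pre_search kw data pos) := by
  unfold Pre_search; infer_instance

def pvWitness_search : List String × List String × Int := (["a"], ["b", "a"], 0)

def Spec_search (kw : List String) (data : List String) (pos : Int) (out : Bool × Option Int × Option Int) : Prop := out = search_alt kw data pos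
instance (kw : List String) (data : List String) (pos : Int) (out : Bool × Option Int × Option Int) : Decidable (Spec_search kw data pos out) := by unfold Spec_search; infer_instance

-- ===== CLAIM (what is proved, stated in full; the proofs are below) =====
def Claim_equal_search : Prop := ∀ (kw : List String) (data : List String) (pos : Int), Dom_search kw data pos → Pre_search kw data pos → Spec_search kw data pos (search kw data pos)

-- ===== LEMMAS AND PROOFS =====

theorem pyRange_one_nil {a b : Int} (h : b ≤ a) : PySem.List.pyRange a b 1 = [] := by
  simp [PySem.List.pyRange]; omega

theorem matchRec_fst (data : List String) :
    ∀ (s : List String) (p : Int), (matchRec s data p).1 = (matchRec s data p).2.isSome := by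
  intro s
  induction s with
  | nil => intro p; rfl
  | cons w s ih =>
    intro p
    simp only [matchRec]
    by_cases hw : w = "*"
    · simp only [if_pos hw]
      by_cases h1 : (matchRec s data (p + 1)).1 = true
      · simp only [if_pos h1]; exact ih _
      · simp only [if_neg h1]; exact ih _
    · simp only [if_neg hw]
      by_cases hcond : p < (data.length : Int) ∧ PySem.List.pyGet? data p = some w
      · simp only [if_pos hcond]; exact ih _
      · simp only [if_neg hcond]; rfl

theorem length_buildRows (data : List String) (pos : Int) (w0 : Nat) (s : List String) :
    (buildRows data pos w0 s).length = w0 - s.length := by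
  induction s with
  | nil => simp [buildRows, rowInit]
  | cons w s ih =>
    simp only [buildRows, rowStep]
    split <;> simp

-- DP cell = second component of the recursive matcher (the heart of the equivalence)
theorem cell_eq (data : List String) (pos : Int) (w0 : Nat) :
    ∀ (s : List String) (c : Nat), c + s.length < w0 →
      (buildRows data pos w0 s).getD c none = (matchRec s data (pos + (c : Int))).2 := by
  intro s
  induction s with
  | nil =>
    intro c hc
    simp only [buildRows, rowInit, matchRec]
    rw [PySem.List.getD_map_range _ _ _ _ (by simpa using hc)]
  | cons w s ih =>
    intro c hc
    simp only [List.length_cons] at hc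
    have hcast : ∀ k : Nat, pos + ((k + 1 : Nat) : Int) = pos + (k : Int) + 1 := by
      intro k; push_cast; ring
    have hlen := length_buildRows data pos w0 s
    set prev := buildRows data pos w0 s with hprev
    have h1 : prev.getD (c + 1) none = (matchRec s data (pos + (c : Int) + 1)).2 := by
      rw [ih (c + 1) (by omega), hcast]
    have h0 : prev.getD c none = (matchRec s data (pos + (c : Int))).2 :=
      ih c (by omega)
    simp only [buildRows, rowStep, ← hprev]
    by_cases hw : w = "*"
    · rw [if_pos hw, PySem.List.getD_map_range _ _ _ _ (by omega), h1, h0]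
      simp only [matchRec, if_pos hw, matchRec_fst data s (pos + (c : Int) + 1)]
      by_cases hs : ((matchRec s data (pos + (c : Int) + 1)).2).isSome = true
      · simp only [if_pos hs]
      · simp only [if_neg hs]
    · rw [if_neg hw, PySem.List.getD_map_range _ _ _ _ (by omega), h1]
      simp only [matchRec, if_neg hw]
      by_cases hcond : pos + (c : Int) < (data.length : Int) ∧
          PySem.List.pyGet? data (pos + (c : Int)) = some w
      · rw [if_pos hcond, if_pos hcond]
      · rw [if_neg hcond, if_neg hcond]

theorem scan_eq (data : List String) (pos nl nr : Int)
    (kwt : List String) (w0 : Nat)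
    (hw0 : (w0 : Int) = (data.length : Int) + kwt.length - pos + 1) :
    ∀ (fuel c : Nat), (fuel : Int) = (data.length : Int) - (pos + c) →
      searchLoop kwt data nl nr (PySem.List.pyRange (pos + (c : Int)) data.length 1) =
        finalScan (buildRows data pos w0 kwt) pos nl nr (data.length : Int) c fuel := by
  intro fuel
  induction fuel with
  | zero =>
    intro c hf
    rw [pyRange_one_nil (by omega)]
    rfl
  | succ fuel ih =>
    intro c hf
    rw [PySem.List.pyRange_one_cons (by omega)]
    have hcell := cell_eq data pos w0 kwt c (by omega)
    simp only [searchLoop, finalScan, hcell]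
    by_cases hflag : ((matchRec kwt data (pos + (c : Int))).2).isSome = true
    · rw [if_pos (by rw [matchRec_fst]; exact hflag), if_pos hflag]
      obtain ⟨v, hv⟩ := Option.isSome_iff_exists.mp hflag
      simp [hv]
    · rw [if_neg (by rw [matchRec_fst]; exact hflag), if_neg hflag]
      have hih := ih (c + 1) (by push_cast; omega)
      have hcast : pos + ((c + 1 : Nat) : Int) = pos + (c : Int) + 1 := by push_cast; ring
      rw [hcast] at hih
      exact hih

theorem find?_congr_mem {α : Type} (p q : α → Bool) :
    ∀ (l : List α), (∀ a ∈ l, p a = q a) → l.find? p = l.find? q := by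
  intro l
  induction l with
  | nil => intro _; rfl
  | cons x xs ih =>
    intro h
    simp only [List.find?_cons]
    rw [h x (by simp)]
    cases q x
    · exact ih (fun a ha => h a (by simp [ha]))
    · rfl

theorem countLead_le (l : List String) : countLead l ≤ l.length := by
  induction l with
  | nil => simp [countLead]
  | cons x xs ih => simp only [countLead, List.length_cons]; split <;> omega

-- the left find? scan of _trim_ast computes B's leading-star count
theorem find?_left_eq (l : List String) (h : ∃ x ∈ l, x ≠ "*") :
    (List.range l.length).find? (fun i => l.getD i "" != "*") = some (countLead l) := by
  induction l with
  | nil => simp at h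
  | cons x xs ih =>
    simp only [List.length_cons, List.range_succ_eq_map, List.find?_cons]
    by_cases hx : x = "*"
    · have hp : ((x :: xs).getD 0 "" != "*") = false := by simp [hx]
      rw [hp, List.find?_map]
      have hxs : ∃ y ∈ xs, y ≠ "*" := by
        obtain ⟨y, hy, hyne⟩ := h
        rcases List.mem_cons.mp hy with rfl | hy'
        · exact absurd hx hyne
        · exact ⟨y, hy', hyne⟩
      have : ((fun i => (x :: xs).getD i "" != "*") ∘ Nat.succ) = (fun i => xs.getD i "" != "*") := by
        funext i; simp
      rw [this, ih hxs]
      simp [countLead, hx]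
    · have hp : ((x :: xs).getD 0 "" != "*") = true := by simp [hx]
      rw [hp]
      simp [countLead, hx]

theorem countLead_append (l l' : List String) (h : ∃ x ∈ l, x ≠ "*") :
    countLead (l ++ l') = countLead l := by
  induction l with
  | nil => simp at h
  | cons x xs ih =>
    by_cases hx : x = "*"
    · have hxs : ∃ y ∈ xs, y ≠ "*" := by
        obtain ⟨y, hy, hyne⟩ := h
        rcases List.mem_cons.mp hy with rfl | hy'
        · exact absurd hx hyne
        · exact ⟨y, hy', hyne⟩
      simp [countLead, hx, ih hxs]
    · simp [countLead, hx]

theorem drop_countLead (l : List String) (h : ∃ x ∈ l, x ≠ "*") :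
    ∃ y ys, l.drop (countLead l) = y :: ys ∧ y ≠ "*" := by
  induction l with
  | nil => simp at h
  | cons x xs ih =>
    by_cases hx : x = "*"
    · have hxs : ∃ y ∈ xs, y ≠ "*" := by
        obtain ⟨y, hy, hyne⟩ := h
        rcases List.mem_cons.mp hy with rfl | hy'
        · exact absurd hx hyne
        · exact ⟨y, hy', hyne⟩
      simpa [countLead, hx] using ih hxs
    · exact ⟨x, xs, by simp [countLead, hx], hx⟩

-- the right find? scan of _trim_ast computes the trailing-star count
theorem find?_right_eq (l : List String) (h : ∃ x ∈ l, x ≠ "*") :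
    (List.range l.length).find? (fun i => l.getD (l.length - i - 1) "" != "*") =
      some (countLead l.reverse) := by
  have hrev : ∃ x ∈ l.reverse, x ≠ "*" := by
    obtain ⟨y, hy, hyne⟩ := h; exact ⟨y, List.mem_reverse.mpr hy, hyne⟩
  have hcongr : ∀ i ∈ List.range l.length,
      (l.getD (l.length - i - 1) "" != "*") = (l.reverse.getD i "" != "*") := by
    intro i hi
    have hi' : i < l.length := List.mem_range.mp hi
    have h1 : l.length - i - 1 < l.length := by omega
    rw [List.getD_eq_getElem _ _ h1, List.getD_eq_getElem _ _ (by simpa using hi'),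
      List.getElem_reverse]
    simp only [Nat.sub_sub, Nat.add_comm i 1]
  rw [find?_congr_mem _ _ _ hcongr]
  have := find?_left_eq l.reverse hrev
  rwa [List.length_reverse] at this

-- ===== VERDICT (by name: the statement is the Claim_ definition above) =====
theorem search_spec : Claim_equal_search := by
  intro kw data pos _ hpre
  obtain ⟨hex, hpos⟩ := hpre
  unfold Spec_search search search_alt
  rw [find?_left_eq kw hex, find?_right_eq kw hex]
  dsimp only
  have hdropex : ∃ x ∈ kw.drop (countLead kw), x ≠ "*" := by
    obtain ⟨y, ys, hd, hyne⟩ := drop_countLead kw hex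
    exact ⟨y, by rw [hd]; simp, hyne⟩
  have htr : countLead ((kw.drop (countLead kw)).reverse) = countLead kw.reverse := by
    conv_rhs => rw [← List.take_append_drop (countLead kw) kw]
    rw [List.reverse_append]
    exact (countLead_append _ _ (by
      obtain ⟨y, hy, hyne⟩ := hdropex
      exact ⟨y, List.mem_reverse.mpr hy, hyne⟩)).symm
  rw [htr]
  set j := countLead kw with hj
  set tr := countLead kw.reverse with htrdef
  have hjle : j ≤ kw.length := countLead_le kw
  have hjtr : j + tr ≤ kw.length := by
    have h2 : countLead ((kw.drop j).reverse) ≤ (kw.drop j).length := by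
      have := countLead_le ((kw.drop j).reverse)
      rwa [List.length_reverse] at this
    rw [htr] at h2
    simp only [List.length_drop] at h2
    omega
  -- the sliced pattern of A equals the drop/take pattern of B
  have hslice : PySem.List.slice kw (some (j : Int)) (some ((kw.length : Int) - (tr : Int))) =
      (kw.drop j).take (kw.length - tr - j) := by
    have hcast : (kw.length : Int) - (tr : Int) = ((kw.length - tr : Nat) : Int) := by omega
    rw [hcast, PySem.List.slice_natCast]
  rw [hslice]
  have hklen : ((kw.drop j).take (kw.length - tr - j)).length = kw.length - tr - j := by
    simp only [List.length_take, List.length_drop]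
    omega
  have hnr : ((kw.length - (kw.length - tr) : Nat) : Int) = (tr : Int) := by omega
  rw [hnr]
  by_cases hge : pos ≥ (data.length : Int)
  · rw [pyRange_one_nil (by omega)]
    have : ((data.length : Int) - pos).toNat = 0 := by omega
    rw [this]
    rfl
  · have hnn : (0:Int) ≤ (data.length : Int) + ((kw.length - tr - j : Nat) : Int) - pos + 1 := by omega
    have hw0 : ((((data.length : Int) + ((kw.length - tr - j : Nat) : Int) - pos + 1).toNat : Nat) : Int)
        = (data.length : Int) + (((kw.drop j).take (kw.length - tr - j)).length : Int) - pos + 1 := by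
      rw [hklen, Int.toNat_of_nonneg hnn]
    have hmain := scan_eq data pos (j : Int) (tr : Int)
      ((kw.drop j).take (kw.length - tr - j))
      (((data.length : Int) + ((kw.length - tr - j : Nat) : Int) - pos + 1).toNat)
      hw0 (((data.length : Int) - pos).toNat) 0 (by omega)
    simp only [Nat.cast_zero, add_zero] at hmain
    exact hmain
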